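-- pv_equiv track=rewrite | github.com/dylangamachefl/bleacher-bot | src/scrape.py | _is_media_rss
-- ===== SOURCE A (Python) =====
-- _MEDIA_DOMAINS = (
--     "i.redd.it", "v.redd.it", "preview.redd.it",
--     "i.imgur.com", "imgur.com/", "gfycat.com", "redgifs.com", "giphy.com",
-- )
--
-- _MEDIA_EXTENSIONS = (".jpg", ".jpeg", ".png", ".gif", ".mp4", ".webm", ".gifv", ".mov")
--
-- def _is_media_rss(raw_summary: str, entry) -> bool:
--     """
--     Detect image/video/meme posts using only data available from the RSS feed.
--     Checks the raw HTML summary and any links attached to the entry for known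
--     media domains and file extensions. Works in CI — no extra API calls needed.
--     """
--     lower = raw_summary.lower()
--     if any(domain in lower for domain in _MEDIA_DOMAINS):
--         return True
--     for link in entry.get("links", []):
--         href = link.get("href", "").lower()
--         if any(domain in href for domain in _MEDIA_DOMAINS):
--             return True
--         if any(href.endswith(ext) for ext in _MEDIA_EXTENSIONS):
--             return True
--     return False
-- ===== SOURCE B (Python) =====
-- _MEDIA_DOMAINS = (
--     "i.redd.it", "v.redd.it", "preview.redd.it",
--     "i.imgur.com", "imgur.com/", "gfycat.com", "redgifs.com", "giphy.com",
-- )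
--
-- _MEDIA_EXTENSIONS = (".jpg", ".jpeg", ".png", ".gif", ".mp4", ".webm", ".gifv", ".mov")
--
--
-- def _is_media_rss(raw_summary: str, entry) -> bool:
--     # One concatenated haystack: scan each domain once over summary + all hrefs
--     # (the "\n" separator cannot occur inside a domain, so no false cross-boundary hits),
--     # then a single extension pass over the hrefs only.
--     hrefs = [link.get("href", "").lower() for link in entry.get("links", [])]
--     blob = "\n".join([raw_summary.lower()] + hrefs)
--     return any(d in blob for d in _MEDIA_DOMAINS) or any(
--         h.endswith(e) for e in _MEDIA_EXTENSIONS for h in hrefs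
--     )
-- ===== Notes on version B (the rewrite author's own statement) =====
-- stated objective: alternative
-- what changed: B replaces A's per-string membership loops with a single "\n"-joined haystack scanned once per domain (the separator cannot occur inside a domain) plus one flat extension pass over the lowered hrefs, instead of A's early-return loop over links with two inner any-scans each.
import Mathlib
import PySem

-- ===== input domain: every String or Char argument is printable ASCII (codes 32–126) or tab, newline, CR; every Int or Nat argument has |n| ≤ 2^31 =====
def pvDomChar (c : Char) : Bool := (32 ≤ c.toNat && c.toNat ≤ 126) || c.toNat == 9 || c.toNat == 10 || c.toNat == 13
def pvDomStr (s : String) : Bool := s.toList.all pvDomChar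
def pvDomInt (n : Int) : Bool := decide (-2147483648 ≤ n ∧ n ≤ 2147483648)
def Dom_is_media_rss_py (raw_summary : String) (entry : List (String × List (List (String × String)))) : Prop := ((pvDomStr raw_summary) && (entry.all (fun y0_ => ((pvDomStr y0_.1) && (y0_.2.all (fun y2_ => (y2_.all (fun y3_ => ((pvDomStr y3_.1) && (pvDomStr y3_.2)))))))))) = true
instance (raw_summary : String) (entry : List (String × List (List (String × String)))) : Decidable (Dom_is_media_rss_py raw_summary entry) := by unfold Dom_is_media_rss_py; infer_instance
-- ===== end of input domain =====

-- B joins the lowered summary and hrefs into one "\n"-separated haystack scanned once per domain,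
-- then does a single extension pass over hrefs (objective: idiomatic/alternative, same results).

def mediaDomains : List String :=
  ["i.redd.it", "v.redd.it", "preview.redd.it",
   "i.imgur.com", "imgur.com/", "gfycat.com", "redgifs.com", "giphy.com"]

def mediaExts : List String :=
  [".jpg", ".jpeg", ".png", ".gif", ".mp4", ".webm", ".gifv", ".mov"]

-- ===== PORT A =====
-- the 'for link in entry.get("links", [])' loop with its early returns
def isMediaLoop (links : List (List (String × String))) : Bool :=
  match links with
  | [] => false
  | link :: rest =>
    let href := PySem.Str.lower (PySem.Dict.getD (PySem.Dict.mk link) "href" "")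
    if mediaDomains.any (fun d => PySem.Str.isIn d href) then true
    else if mediaExts.any (fun e => PySem.Str.endswith href e) then true
    else isMediaLoop rest

def is_media_rss_py (raw_summary : String) (entry : List (String × List (List (String × String)))) : Bool :=
  let lower := PySem.Str.lower raw_summary
  if mediaDomains.any (fun d => PySem.Str.isIn d lower) then true
  else isMediaLoop (PySem.Dict.getD (PySem.Dict.mk entry) "links" [])

-- ===== PORT B =====
def is_media_rss_py_alt (raw_summary : String) (entry : List (String × List (List (String × String)))) : Bool :=
  let hrefs := (PySem.Dict.getD (PySem.Dict.mk entry) "links" []).map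
    (fun link => PySem.Str.lower (PySem.Dict.getD (PySem.Dict.mk link) "href" ""))
  let blob := PySem.Str.join "\n" (PySem.Str.lower raw_summary :: hrefs)
  mediaDomains.any (fun d => PySem.Str.isIn d blob)
    || mediaExts.any (fun e => hrefs.any (fun h => PySem.Str.endswith h e))

-- ===== PRECONDITION & SPEC =====
def Spec_is_media_rss_py (raw_summary : String) (entry : List (String × List (List (String × String)))) (out : Bool) : Prop := out = is_media_rss_py_alt raw_summary entry
instance (raw_summary : String) (entry : List (String × List (List (String × String)))) (out : Bool) : Decidable (Spec_is_media_rss_py raw_summary entry out) := by unfold Spec_is_media_rss_py; infer_instance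

-- ===== CLAIM (what is proved, stated in full; the proofs are below) =====
def Claim_equal_is_media_rss_py : Prop := ∀ (raw_summary : String) (entry : List (String × List (List (String × String)))), Dom_is_media_rss_py raw_summary entry → Spec_is_media_rss_py raw_summary entry (is_media_rss_py raw_summary entry)

-- ===== LEMMAS AND PROOFS =====

-- a prefix of x ++ c :: y not containing c is a prefix of x
theorem pv_prefix_sep {α : Type} (c : α) (t x y : List α)
    (h : t <+: x ++ c :: y) (hc : c ∉ t) : t <+: x := by
  induction t generalizing x with
  | nil => exact List.nil_prefix
  | cons b t' ih =>
    cases x with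
    | nil =>
      rw [List.nil_append, List.cons_prefix_cons] at h
      exact absurd (h.1 ▸ List.mem_cons_self) hc
    | cons a x' =>
      rw [List.cons_append, List.cons_prefix_cons] at h
      exact List.cons_prefix_cons.mpr ⟨h.1,
        ih x' (h.2) (fun hm => hc (List.mem_cons_of_mem _ hm))⟩

-- an infix of x ++ c :: y not containing c is an infix of x or of y
theorem pv_infix_split {α : Type} (c : α) (d x y : List α)
    (h : d <:+: x ++ c :: y) (hc : c ∉ d) : d <:+: x ∨ d <:+: y := by
  induction x with
  | nil =>
    rw [List.nil_append, List.infix_cons_iff] at h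
    rcases h with h | h
    · cases d with
      | nil => exact Or.inl (List.nil_infix)
      | cons b t =>
        rw [List.cons_prefix_cons] at h
        exact absurd (h.1 ▸ List.mem_cons_self) hc
    · exact Or.inr h
  | cons a x' ih =>
    rw [List.cons_append, List.infix_cons_iff] at h
    rcases h with h | h
    · cases d with
      | nil => exact Or.inl (List.nil_infix)
      | cons b t =>
        rw [List.cons_prefix_cons] at h
        refine Or.inl ?_
        have ht : t <+: x' := pv_prefix_sep c t x' y h.2
          (fun hm => hc (List.mem_cons_of_mem _ hm))
        exact (List.cons_prefix_cons.mpr ⟨h.1, ht⟩).isInfix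
    · rcases ih h with h' | h'
      · exact Or.inl (List.infix_cons_iff.mpr (Or.inr h'))
      · exact Or.inr h'

-- substring of a [c]-joined list ↔ substring of one part (c not in the needle)
theorem pv_infix_join (c : Char) (d : List Char) (hc : c ∉ d)
    (p : List Char) (ps : List (List Char)) :
    d <:+: PySem.Chars.join [c] (p :: ps) ↔ d <:+: p ∨ ∃ q ∈ ps, d <:+: q := by
  induction ps generalizing p with
  | nil => simp [PySem.Chars.join_singleton]
  | cons q ps' ih =>
    rw [PySem.Chars.join_cons_cons, List.append_assoc, List.singleton_append]
    constructor
    · intro h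
      rcases pv_infix_split c d p _ h hc with h' | h'
      · exact Or.inl h'
      · rcases (ih q).mp h' with h'' | ⟨r, hr, h''⟩
        · exact Or.inr ⟨q, List.mem_cons_self, h''⟩
        · exact Or.inr ⟨r, List.mem_cons_of_mem _ hr, h''⟩
    · intro h
      rcases h with h' | ⟨r, hr, h'⟩
      · exact h'.trans (List.prefix_append _ _).isInfix
      · have hj : d <:+: PySem.Chars.join [c] (q :: ps') := by
          rcases List.mem_cons.mp hr with heq | hr'
          · exact (ih q).mpr (Or.inl (heq ▸ h'))
          · exact (ih q).mpr (Or.inr ⟨r, hr', h'⟩)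
        exact hj.trans ⟨p ++ [c], [], by simp⟩

-- 'd in "\n".join(s :: hs)' ↔ d in s or in some h
theorem pv_isIn_join (d s : String) (hs : List String) (hc : '\n' ∉ d.toList) :
    PySem.Str.isIn d (PySem.Str.join "\n" (s :: hs)) = true ↔
      PySem.Str.isIn d s = true ∨ ∃ h ∈ hs, PySem.Str.isIn d h = true := by
  rw [PySem.Str.isIn_iff_infix, PySem.Str.toList_join]
  have : ("\n".toList : List Char) = ['\n'] := rfl
  rw [List.map_cons, this, pv_infix_join '\n' d.toList hc]
  constructor
  · rintro (h | ⟨q, hq, h⟩)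
    · exact Or.inl ((PySem.Str.isIn_iff_infix _ _).mpr h)
    · rcases List.mem_map.mp hq with ⟨h0, hh0, rfl⟩
      exact Or.inr ⟨h0, hh0, (PySem.Str.isIn_iff_infix _ _).mpr h⟩
  · rintro (h | ⟨h0, hh0, h⟩)
    · exact Or.inl ((PySem.Str.isIn_iff_infix _ _).mp h)
    · exact Or.inr ⟨h0.toList, List.mem_map.mpr ⟨h0, hh0, rfl⟩,
        (PySem.Str.isIn_iff_infix _ _).mp h⟩

-- no media domain contains a newline
theorem pv_domains_newline : ∀ d ∈ mediaDomains, '\n' ∉ d.toList := by decide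

-- A's link loop as an 'any'
theorem pv_loop_any (links : List (List (String × String))) :
    isMediaLoop links = links.any (fun link =>
      let href := PySem.Str.lower (PySem.Dict.getD (PySem.Dict.mk link) "href" "")
      mediaDomains.any (fun d => PySem.Str.isIn d href)
        || mediaExts.any (fun e => PySem.Str.endswith href e)) := by
  induction links with
  | nil => rfl
  | cons link rest ih =>
    rw [List.any_cons, ← ih]
    simp only [isMediaLoop]
    split_ifs with h1 h2 <;> simp_all

-- ===== VERDICT (by name: the statement is the Claim_ definition above) =====
theorem is_media_rss_py_spec : Claim_equal_is_media_rss_py := by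
  intro raw_summary entry _
  show is_media_rss_py raw_summary entry = is_media_rss_py_alt raw_summary entry
  unfold is_media_rss_py is_media_rss_py_alt
  rw [pv_loop_any]
  set links := PySem.Dict.getD (PySem.Dict.mk entry) "links" ([] : List (List (String × String))) with hl
  set lower := PySem.Str.lower raw_summary with hlo
  simp only [List.any_map]
  rw [Bool.eq_iff_iff]
  constructor
  · intro h
    split_ifs at h with hsum
    · -- summary hit: the blob contains that domain
      rcases List.any_eq_true.mp hsum with ⟨d, hd, hdin⟩
      exact Bool.or_eq_true_iff.mpr (Or.inl (List.any_eq_true.mpr ⟨d, hd,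
        (pv_isIn_join d lower _ (pv_domains_newline d hd)).mpr (Or.inl hdin)⟩))
    · rcases List.any_eq_true.mp h with ⟨link, hlink, hhit⟩
      simp only [Bool.or_eq_true_iff] at hhit
      rcases hhit with hdom | hext
      · rcases List.any_eq_true.mp hdom with ⟨d, hd, hdin⟩
        refine Bool.or_eq_true_iff.mpr (Or.inl (List.any_eq_true.mpr ⟨d, hd, ?_⟩))
        exact (pv_isIn_join d lower _ (pv_domains_newline d hd)).mpr
          (Or.inr ⟨_, List.mem_map.mpr ⟨link, hlink, rfl⟩, hdin⟩)
      · rcases List.any_eq_true.mp hext with ⟨e, he, hend⟩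
        exact Bool.or_eq_true_iff.mpr (Or.inr (List.any_eq_true.mpr ⟨e, he,
          List.any_eq_true.mpr ⟨link, hlink, hend⟩⟩))
  · intro h
    rcases Bool.or_eq_true_iff.mp h with hdom | hext
    · rcases List.any_eq_true.mp hdom with ⟨d, hd, hdin⟩
      rcases (pv_isIn_join d lower _ (pv_domains_newline d hd)).mp hdin with hsum | ⟨h0, hh0, hin⟩
      · rw [if_pos (List.any_eq_true.mpr ⟨d, hd, hsum⟩)]
      · rcases List.mem_map.mp hh0 with ⟨link, hlink, rfl⟩
        split_ifs with hsum
        · rfl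
        · exact List.any_eq_true.mpr ⟨link, hlink, Bool.or_eq_true_iff.mpr
            (Or.inl (List.any_eq_true.mpr ⟨d, hd, hin⟩))⟩
    · rcases List.any_eq_true.mp hext with ⟨e, he, hany⟩
      rcases List.any_eq_true.mp hany with ⟨link, hlink, hend⟩
      split_ifs with hsum
      · rfl
      · exact List.any_eq_true.mpr ⟨link, hlink, Bool.or_eq_true_iff.mpr
          (Or.inr (List.any_eq_true.mpr ⟨e, he, hend⟩))⟩
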